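-- pv_equiv track=rewrite | github.com/KVedantK/ML_Algorithms | College_Updates/NaiveBayes.py | data_Sorter
-- ===== SOURCE A (Python) =====
-- def data_Sorter(data):
--     Sorted_data = {}
--     for i in range(0, len(data)):
--         for j in range(0,len(data[0])-1):
--             if data[i][j].lower() in Sorted_data.keys():
--                 if data[i][len(data[0])-1].lower() == 'yes':
--                     Sorted_data[data[i][j].lower()][0] += 1
--                 else:
--                     Sorted_data[data[i][j].lower()][1] += 1
--             else:
--                 if data[i][len(data[0])-1].lower() == 'yes':
--                     Sorted_data[data[i][j].lower()] = [1,0]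
--                 else:
--                     Sorted_data[data[i][j].lower()] = [0,1]
--     return Sorted_data
-- ===== SOURCE B (Python) =====
-- from collections import Counter
--
-- def data_Sorter(data):
--     if not data or len(data[0]) < 2:
--         return {}
--     label = len(data[0]) - 1
--     cells = [[c.lower() for c in row[:label]] for row in data]
--     is_yes = [row[label].lower() == 'yes' for row in data]
--     yes = Counter(v for cs, y in zip(cells, is_yes) if y for v in cs)
--     no = Counter(v for cs, y in zip(cells, is_yes) if not y for v in cs)
--     return {v: [yes[v], no[v]] for cs in cells for v in cs}
-- ===== Notes on version B (the rewrite author's own statement) =====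
-- stated objective: alternative
-- what changed: A builds the dict cell by cell with a membership test and an in-place [yes,no] increment per cell; B splits the rows into yes/no groups, counts each group's lowered cells with a Counter, and rebuilds the dict in one comprehension from the two full-table counts (first-seen key order preserved).
import Mathlib
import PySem

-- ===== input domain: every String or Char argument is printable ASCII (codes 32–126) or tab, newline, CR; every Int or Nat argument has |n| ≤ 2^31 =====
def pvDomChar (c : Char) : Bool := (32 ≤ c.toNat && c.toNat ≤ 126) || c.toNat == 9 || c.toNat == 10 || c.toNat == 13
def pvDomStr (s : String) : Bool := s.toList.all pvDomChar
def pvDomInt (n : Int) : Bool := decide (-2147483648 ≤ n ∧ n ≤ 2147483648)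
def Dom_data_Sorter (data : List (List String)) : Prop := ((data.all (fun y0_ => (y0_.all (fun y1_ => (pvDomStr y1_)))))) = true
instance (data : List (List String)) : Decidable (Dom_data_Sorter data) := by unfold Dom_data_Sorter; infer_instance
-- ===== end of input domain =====

-- B groups rows into yes/no Counters and rebuilds the dict from full-list counts (different decomposition, same values and key order); A's incremental per-cell dict updates disappear.

-- ===== PORT A =====
-- the in-place updates Sorted_data[key][0] += 1 / Sorted_data[key][1] += 1 on the stored
-- 2-element list (every stored value is a 2-element list)
def pvInc0 : List Int → List Int
  | a :: rest => (a + 1) :: rest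
  | [] => []
def pvInc1 : List Int → List Int
  | a :: b :: rest => a :: (b + 1) :: rest
  | l => l
-- literal port of A: nested index loops building the dict incrementally.
-- Sorted_data[key][0] += 1 / [1] += 1 on the stored 2-element list is ported as the
-- obvious in-place list update (every stored value is a 2-element list).
def data_Sorter (data : List (List String)) : List (String × List Int) :=
  ((PySem.List.pyRange 0 (PySem.List.len data)).foldl (fun sd i =>
    (PySem.List.pyRange 0 (PySem.List.len (PySem.List.pyGetD data 0 []) - 1)).foldl (fun sd j =>
      let key := PySem.Str.lower (PySem.List.pyGetD (PySem.List.pyGetD data i []) j "")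
      let lab := PySem.Str.lower (PySem.List.pyGetD (PySem.List.pyGetD data i [])
                    (PySem.List.len (PySem.List.pyGetD data 0 []) - 1) "")
      if sd.contains key then
        if lab == "yes" then
          sd.modify key [0,0] pvInc0
        else
          sd.modify key [0,0] pvInc1
      else
        if lab == "yes" then sd.insert key [1,0] else sd.insert key [0,1]) sd)
    (PySem.Dict.empty : PySem.Dict String (List Int))).items

-- ===== PORT B =====
-- literal port of Source B: split rows by label, two Counters, rebuild via dict comprehension
def data_Sorter_alt (data : List (List String)) : List (String × List Int) :=
  if data = [] ∨ PySem.List.len (data.headD []) < 2 then []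
  else
    let label : Int := PySem.List.len (data.headD []) - 1
    let cells := data.map (fun row => (PySem.List.slice row none (some label)).map PySem.Str.lower)
    let isYes := data.map (fun row => PySem.Str.lower (PySem.List.pyGetD row label "") == "yes")
    let pairs := cells.zip isYes
    let yes := PySem.Dict.counter ((pairs.filter (fun p => p.2)).flatMap (fun p => p.1))
    let no  := PySem.Dict.counter ((pairs.filter (fun p => !p.2)).flatMap (fun p => p.1))
    ((cells.flatMap id).foldl
      (fun d v => d.insert v [yes.getD v 0, no.getD v 0])
      (PySem.Dict.empty : PySem.Dict String (List Int))).items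

-- ===== PRECONDITION & SPEC =====
-- Pre_ excludes exactly the inputs on which A raises IndexError: a nonempty table whose
-- first row has ≥ 2 columns while some row is shorter than the first row.
def Pre_data_Sorter (data : List (List String)) : Prop :=
  (data.headD []).length ≤ 1 ∨ ∀ row ∈ data, (data.headD []).length ≤ row.length
instance (data : List (List String)) : Decidable (Pre_data_Sorter data) := by
  unfold Pre_data_Sorter; infer_instance

def pvWitness_data_Sorter : List (List String) :=
  [["Sunny", "Hot", "Yes"], ["rainy", "hot", "no"], ["sunny", "Mild", "YES"]]

def Spec_data_Sorter (data : List (List String)) (out : List (String × List Int)) : Prop := out = data_Sorter_alt data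
instance (data : List (List String)) (out : List (String × List Int)) : Decidable (Spec_data_Sorter data out) := by unfold Spec_data_Sorter; infer_instance

-- ===== CLAIM (what is proved, stated in full; the proofs are below) =====
def Claim_equal_data_Sorter : Prop := ∀ (data : List (List String)), Dom_data_Sorter data → Pre_data_Sorter data → Spec_data_Sorter data (data_Sorter data)

-- ===== LEMMAS AND PROOFS =====

-- the lowered feature cells of a row (k = number of feature columns)
def pvLow (row : List String) (k : Nat) : List String := (row.take k).map PySem.Str.lower

-- the row's label test, read at column k (= len(data[0]) - 1)
def pvLab (row : List String) (k : Nat) : Bool := PySem.Str.lower (row.getD k "") == "yes"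

-- every (lowered cell, label) pair of the table, in row-major order
def pvPairs (data : List (List String)) (k : Nat) : List (String × Bool) :=
  data.flatMap (fun row => (pvLow row k).map (fun v => (v, pvLab row k)))

-- how often value v occurs among pairs with label b
def pvCnt (b : Bool) (ps : List (String × Bool)) (v : String) : Nat :=
  ((ps.filter (fun p => p.2 == b)).map (fun p => p.1)).count v

-- the common normal form of both ports' dicts: first-seen key order, full-list counts
def pvCanon (ps : List (String × Bool)) : List (String × List Int) :=
  (PySem.List.dedup (ps.map (fun p => p.1))).map
    (fun v => (v, [((pvCnt true ps v : Nat) : Int), ((pvCnt false ps v : Nat) : Int)]))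

-- A's per-pair dict update
def pvStep (sd : PySem.Dict String (List Int)) (p : String × Bool) : PySem.Dict String (List Int) :=
  if sd.contains p.1 then
    if p.2 then
      sd.modify p.1 [0,0] pvInc0
    else
      sd.modify p.1 [0,0] pvInc1
  else
    if p.2 then sd.insert p.1 [1,0] else sd.insert p.1 [0,1]

lemma pv_foldl_range_getD {α β : Type} (xs : List α) (d : α) (f : β → α → β) :
    ∀ (n : Nat) (init : β), n ≤ xs.length →
      (List.range n).foldl (fun acc j => f acc (xs.getD j d)) init = (xs.take n).foldl f init := by
  intro n
  induction n with
  | zero => intro init h; simp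
  | succ n ih =>
    intro init h
    have hn : n < xs.length := by omega
    rw [List.range_succ, List.foldl_append, ih init (by omega), List.take_add_one,
      List.foldl_append]
    simp [List.getElem?_eq_getElem hn, List.getD_eq_getElem?_getD]

lemma pvCnt_append (b : Bool) (l1 l2 : List (String × Bool)) (v : String) :
    pvCnt b (l1 ++ l2) v = pvCnt b l1 v + pvCnt b l2 v := by
  simp [pvCnt, List.filter_append, List.count_append]

lemma pvCnt_singleton (b y : Bool) (k v : String) :
    pvCnt b [(k, y)] v = if y = b ∧ k = v then 1 else 0 := by
  by_cases hy : y = b <;> by_cases hk : k = v <;> simp [pvCnt, hy, hk]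

lemma pvCnt_eq_zero_of_not_mem (b : Bool) (ps : List (String × Bool)) (k : String)
    (h : k ∉ ps.map (fun p => p.1)) : pvCnt b ps k = 0 := by
  rw [pvCnt, List.count_eq_zero]
  intro hmem
  apply h
  rcases List.mem_map.mp hmem with ⟨p, hp, rfl⟩
  exact List.mem_map.mpr ⟨p, List.mem_of_mem_filter hp, rfl⟩

lemma pv_keys_canon (ps : List (String × Bool)) :
    (PySem.Dict.mk (pvCanon ps)).keys = PySem.List.dedup (ps.map (fun p => p.1)) := by
  simp [PySem.Dict.keys, pvCanon, Function.comp_def]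

lemma pv_contains_canon (ps : List (String × Bool)) (k : String) :
    (PySem.Dict.mk (pvCanon ps)).contains k = true ↔ k ∈ ps.map (fun p => p.1) := by
  rw [PySem.Dict.contains_iff_mem_keys, pv_keys_canon, PySem.List.mem_dedup]

-- A's loop in closed form
lemma pv_foldl_pvStep (ps : List (String × Bool)) :
    ps.foldl pvStep PySem.Dict.empty = PySem.Dict.mk (pvCanon ps) := by
  induction ps using List.reverseRecOn with
  | nil => rfl
  | append_singleton ps p ih =>
    obtain ⟨k, y⟩ := p
    rw [List.foldl_append, List.foldl_cons, List.foldl_nil, ih]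
    have hdedupmap : (ps ++ [(k, y)]).map (fun p => p.1) = ps.map (fun p => p.1) ++ [k] := by simp
    by_cases hk : k ∈ ps.map (fun p => p.1)
    · -- key already present: pvStep modifies it in place
      have hc : (PySem.Dict.mk (pvCanon ps)).contains k = true := (pv_contains_canon ps k).mpr hk
      have hnd : (PySem.Dict.mk (pvCanon ps)).keys.Nodup := by
        rw [pv_keys_canon]; exact PySem.List.nodup_dedup _
      have hmemitems : (k, ([((pvCnt true ps k : Nat) : Int), ((pvCnt false ps k : Nat) : Int)] : List Int))
          ∈ (PySem.Dict.mk (pvCanon ps)).items :=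
        List.mem_map.mpr ⟨k, (PySem.List.mem_dedup _ _).mpr hk, rfl⟩
      have hgetD := PySem.Dict.getD_of_mem_items _ hmemitems hnd ([0,0] : List Int)
      have hd : PySem.List.dedup ((ps ++ [(k, y)]).map (fun p => p.1))
          = PySem.List.dedup (ps.map (fun p => p.1)) := by
        rw [hdedupmap, PySem.List.dedup_eq_ofList, PySem.Set.ofList_append_singleton,
          PySem.Set.add_of_mem (by rw [← PySem.List.dedup_eq_ofList]; exact (PySem.List.mem_dedup _ _).mpr hk),
          PySem.List.dedup_eq_ofList]
      apply PySem.Dict.ext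
      cases y <;>
      · simp only [pvStep, hc, if_true, Bool.false_eq_true, if_false, PySem.Dict.modify, hgetD]
        rw [PySem.Dict.items_insert_of_contains _ _ hc]
        show List.map _ (List.map _ _) = _
        rw [List.map_map]
        unfold pvCanon
        rw [hd]
        apply List.map_congr_left
        intro u _
        by_cases huv : u = k
        · simp [huv, pvInc0, pvInc1, pvCnt_append, pvCnt_singleton]
        · simp [huv, Ne.symm huv, pvCnt_append, pvCnt_singleton]
    · -- fresh key: pvStep appends it
      have hc : (PySem.Dict.mk (pvCanon ps)).contains k = false :=
        Bool.eq_false_iff.mpr (fun h => hk ((pv_contains_canon ps k).mp h))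
      have hd : PySem.List.dedup ((ps ++ [(k, y)]).map (fun p => p.1))
          = PySem.List.dedup (ps.map (fun p => p.1)) ++ [k] := by
        rw [hdedupmap, PySem.List.dedup_eq_ofList, PySem.Set.ofList_append_singleton,
          PySem.Set.add_of_not_mem (by rw [← PySem.List.dedup_eq_ofList]; exact fun h => hk ((PySem.List.mem_dedup _ _).mp h)),
          PySem.List.dedup_eq_ofList]
      apply PySem.Dict.ext
      cases y <;>
      · simp only [pvStep, hc, Bool.false_eq_true, if_false, if_true]
        rw [PySem.Dict.items_insert_of_not_contains _ _ hc]
        unfold pvCanon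
        rw [hd, List.map_append]
        congr 1
        · apply List.map_congr_left
          intro u hu
          have huk : u ≠ k := by
            intro h; subst h; exact hk ((PySem.List.mem_dedup _ _).mp hu)
          simp [pvCnt_append, pvCnt_singleton, Ne.symm huk]
        · simp [pvCnt_append, pvCnt_singleton, fun b => (pvCnt_eq_zero_of_not_mem b ps k hk)]

lemma pv_keys_mk_map {F : String → List Int} (vs : List String) :
    (PySem.Dict.mk (vs.map (fun v => (v, F v)))).keys = vs := by
  simp [PySem.Dict.keys, Function.comp_def]

lemma pv_contains_mk_map {F : String → List Int} (vs : List String) (k : String) :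
    (PySem.Dict.mk (vs.map (fun v => (v, F v)))).contains k = true ↔ k ∈ vs := by
  rw [PySem.Dict.contains_iff_mem_keys, pv_keys_mk_map]

-- B's rebuild loop in closed form
lemma pv_foldl_insert_const (vs : List String) (F : String → List Int) :
    vs.foldl (fun d v => d.insert v (F v)) PySem.Dict.empty
      = PySem.Dict.mk ((PySem.List.dedup vs).map (fun v => (v, F v))) := by
  induction vs using List.reverseRecOn with
  | nil => rfl
  | append_singleton vs v ih =>
    rw [List.foldl_append, List.foldl_cons, List.foldl_nil, ih]
    by_cases hv : v ∈ PySem.List.dedup vs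
    · have hc : (PySem.Dict.mk ((PySem.List.dedup vs).map (fun v => (v, F v)))).contains v = true :=
        (pv_contains_mk_map _ _).mpr hv
      have hd : PySem.List.dedup (vs ++ [v]) = PySem.List.dedup vs := by
        rw [PySem.List.dedup_eq_ofList, PySem.Set.ofList_append_singleton,
          PySem.Set.add_of_mem (by rwa [← PySem.List.dedup_eq_ofList]), PySem.List.dedup_eq_ofList]
      apply PySem.Dict.ext
      rw [PySem.Dict.items_insert_of_contains _ _ hc, hd]
      show List.map _ (List.map _ _) = _
      rw [List.map_map]
      apply List.map_congr_left
      intro u _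
      by_cases huv : u = v <;> simp [huv]
    · have hc : (PySem.Dict.mk ((PySem.List.dedup vs).map (fun v => (v, F v)))).contains v = false :=
        Bool.eq_false_iff.mpr (fun h => hv ((pv_contains_mk_map _ _).mp h))
      have hd : PySem.List.dedup (vs ++ [v]) = PySem.List.dedup vs ++ [v] := by
        rw [PySem.List.dedup_eq_ofList, PySem.Set.ofList_append_singleton,
          PySem.Set.add_of_not_mem (by rwa [← PySem.List.dedup_eq_ofList]), PySem.List.dedup_eq_ofList]
      apply PySem.Dict.ext
      rw [PySem.Dict.items_insert_of_not_contains _ _ hc, hd]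
      simp

-- Counter over a filtered group = per-label count over all pairs
lemma pv_count_bridge (b : Bool) (prs : List (List String × Bool)) (v : String) :
    List.count v ((prs.filter (fun p => p.2 == b)).flatMap (fun p => p.1))
      = pvCnt b (prs.flatMap (fun p => p.1.map (fun u => (u, p.2)))) v := by
  induction prs with
  | nil => simp [pvCnt]
  | cons hd tl ih =>
    obtain ⟨cs, y⟩ := hd
    rw [List.flatMap_cons, pvCnt_append, ← ih]
    by_cases hy : y = b
    · simp [hy, pvCnt, List.filter_map, Function.comp_def, List.map_map]
    · have hyb : (y == b) = false := by simp [hy]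
      simp [hyb, pvCnt, List.filter_map, Function.comp_def]

-- A's nested index loops = the flat fold of pvStep over the row-major pairs
lemma pv_A_eq (r0 : List String) (rest : List (List String))
    (hw : 2 ≤ r0.length)
    (hPre : ∀ row ∈ (r0 :: rest), r0.length ≤ row.length) :
    data_Sorter (r0 :: rest)
      = ((pvPairs (r0 :: rest) (r0.length - 1)).foldl pvStep PySem.Dict.empty).items := by
  have hcast : PySem.List.len r0 - 1 = ((r0.length - 1 : Nat) : Int) := by
    rw [PySem.List.len_eq]; omega
  unfold data_Sorter pvPairs
  rw [List.foldl_flatMap]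
  simp only [PySem.List.pyGetD_zero_cons]
  rw [PySem.List.foldl_pyRange_zero_pyGetD (r0 :: rest) ([] : List String)
    (fun sd row =>
      (PySem.List.pyRange 0 (PySem.List.len r0 - 1)).foldl (fun sd j =>
        if sd.contains (PySem.Str.lower (PySem.List.pyGetD row j "")) then
          if PySem.Str.lower (PySem.List.pyGetD row (PySem.List.len r0 - 1) "") == "yes" then
            sd.modify (PySem.Str.lower (PySem.List.pyGetD row j "")) [0,0]
              pvInc0
          else
            sd.modify (PySem.Str.lower (PySem.List.pyGetD row j "")) [0,0]
              pvInc1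
        else
          if PySem.Str.lower (PySem.List.pyGetD row (PySem.List.len r0 - 1) "") == "yes" then
            sd.insert (PySem.Str.lower (PySem.List.pyGetD row j "")) [1,0]
          else sd.insert (PySem.Str.lower (PySem.List.pyGetD row j "")) [0,1]) sd)
    PySem.Dict.empty]
  congr 1
  apply PySem.List.foldl_congr_mem
  intro sd row hrow
  have hlen : r0.length ≤ row.length := hPre row hrow
  rw [hcast, PySem.List.pyRange_zero_natCast, List.foldl_map]
  simp only [PySem.List.pyGetD_natCast]
  rw [pv_foldl_range_getD row "" (fun sd cell =>
        if sd.contains (PySem.Str.lower cell) then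
          if PySem.Str.lower (row.getD (r0.length - 1) "") == "yes" then
            sd.modify (PySem.Str.lower cell) [0,0]
              pvInc0
          else
            sd.modify (PySem.Str.lower cell) [0,0]
              pvInc1
        else
          if PySem.Str.lower (row.getD (r0.length - 1) "") == "yes" then
            sd.insert (PySem.Str.lower cell) [1,0]
          else sd.insert (PySem.Str.lower cell) [0,1])
      (r0.length - 1) sd (by omega)]
  rw [List.foldl_map]
  unfold pvLow
  rw [List.foldl_map]
  apply PySem.List.foldl_congr_mem
  intro acc cell _
  simp only [pvStep, pvLab]

-- B in closed form
lemma pv_B_eq (r0 : List String) (rest : List (List String)) (hw : 2 ≤ r0.length) :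
    data_Sorter_alt (r0 :: rest) = pvCanon (pvPairs (r0 :: rest) (r0.length - 1)) := by
  have hcond : ¬ ((r0 :: rest : List (List String)) = [] ∨ PySem.List.len ((r0 :: rest).headD []) < 2) := by
    simp [PySem.List.len_eq]; omega
  have hk : PySem.List.len ((r0 :: rest : List (List String)).headD []) - 1
      = ((r0.length - 1 : Nat) : Int) := by
    simp [PySem.List.len_eq]; omega
  unfold data_Sorter_alt
  rw [if_neg hcond, hk]
  simp only [PySem.List.slice_to_natCast, PySem.List.pyGetD_natCast, List.zip_map',
    PySem.Dict.getD_counter]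
  rw [pv_foldl_insert_const]
  have hvs : List.flatMap id
        (List.map (fun row => List.map PySem.Str.lower (List.take (r0.length - 1) row)) (r0 :: rest))
      = (pvPairs (r0 :: rest) (r0.length - 1)).map (fun p => p.1) := by
    simp [pvPairs, pvLow, List.flatMap_map, List.map_flatMap, List.map_map, Function.comp_def]
  rw [hvs]
  have hbt : ∀ v : String, List.count v
        (List.flatMap (fun p => p.1) (List.filter (fun p => p.2)
          (List.map (fun a => (List.map PySem.Str.lower (List.take (r0.length - 1) a),
            PySem.Str.lower (a.getD (r0.length - 1) "") == "yes")) (r0 :: rest))))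
      = pvCnt true (pvPairs (r0 :: rest) (r0.length - 1)) v := by
    intro v
    have h := pv_count_bridge true
      (List.map (fun a => (List.map PySem.Str.lower (List.take (r0.length - 1) a),
        PySem.Str.lower (a.getD (r0.length - 1) "") == "yes")) (r0 :: rest)) v
    simp only [beq_true] at h
    rw [h]
    congr 1
    simp [pvPairs, pvLow, pvLab, List.flatMap_map, List.map_map, Function.comp_def]
  have hbf : ∀ v : String, List.count v
        (List.flatMap (fun p => p.1) (List.filter (fun p => !p.2)
          (List.map (fun a => (List.map PySem.Str.lower (List.take (r0.length - 1) a),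
            PySem.Str.lower (a.getD (r0.length - 1) "") == "yes")) (r0 :: rest))))
      = pvCnt false (pvPairs (r0 :: rest) (r0.length - 1)) v := by
    intro v
    have h := pv_count_bridge false
      (List.map (fun a => (List.map PySem.Str.lower (List.take (r0.length - 1) a),
        PySem.Str.lower (a.getD (r0.length - 1) "") == "yes")) (r0 :: rest)) v
    simp only [beq_false] at h
    rw [h]
    congr 1
    simp [pvPairs, pvLow, pvLab, List.flatMap_map, List.map_map, Function.comp_def]
  unfold pvCanon
  apply List.map_congr_left
  intro v _
  rw [hbt v, hbf v]

-- ===== VERDICT (by name: the statement is the Claim_ definition above) =====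
theorem data_Sorter_spec : Claim_equal_data_Sorter := by
  intro data _hdom hpre
  show data_Sorter data = data_Sorter_alt data
  match data with
  | [] => decide
  | r0 :: rest =>
    by_cases hw : r0.length ≤ 1
    · -- first row has fewer than 2 feature+label columns: both sides return the empty dict
      have hr : PySem.List.pyRange 0 (PySem.List.len r0 - 1) = [] := by
        simp only [PySem.List.pyRange]
        simp [PySem.List.len_eq]
        omega
      have hcond : (r0 :: rest : List (List String)) = [] ∨ PySem.List.len ((r0 :: rest).headD []) < 2 := by
        right; simp [PySem.List.len_eq]; omega
      simp only [data_Sorter, data_Sorter_alt, if_pos hcond, PySem.List.pyGetD_zero_cons, hr,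
        List.foldl_nil]
      rw [List.foldl_fixed]
      rfl
    · have hw2 : 2 ≤ r0.length := by omega
      have hall : ∀ row ∈ (r0 :: rest), r0.length ≤ row.length := by
        rcases hpre with h | h
        · exact absurd h (by simp; omega)
        · simpa using h
      rw [pv_A_eq r0 rest hw2 hall, pv_B_eq r0 rest hw2, pv_foldl_pvStep]
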